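-- pv_equiv track=rewrite | github.com/Adamkleo/Uni | Year 3/Heuristics/Heuristics-second-lab/parte-2/ASTARTraslados.py | grid_data
-- ===== SOURCE A (Python) =====
-- def grid_data(grid):
--     positions = {"N": [], "C": [], "P": [], "CN": [], "CC": []}
--     for i, row in enumerate(grid):
--         for j, cell in enumerate(row):
--             if cell in positions:
--                 if cell in ["CN", "CC", "P"]:
--                     positions[cell] = [i, j]
--                 else:
--                     positions[cell].append([i, j])
--     return positions['N'], positions['C'], positions['P'], positions['CN'], positions['CC']
-- ===== SOURCE B (Python) =====
-- def grid_data(grid):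
--     cells = [(i, j, cell) for i, row in enumerate(grid) for j, cell in enumerate(row)]
--     N = [[i, j] for (i, j, c) in cells if c == "N"]
--     C = [[i, j] for (i, j, c) in cells if c == "C"]
--
--     def last(key):
--         for (i, j, c) in reversed(cells):
--             if c == key:
--                 return [i, j]
--         return []
--
--     return N, C, last("P"), last("CN"), last("CC")
-- ===== Notes on version B (the rewrite author's own statement) =====
-- stated objective: simpler
-- what changed: Replaces the single interleaved dict-updating pass with a one-shot flattening of the grid into (i,j,cell) triples, from which N and C are plain filtering comprehensions and P/CN/CC are reversed-scan last-match lookups defaulting to an empty list.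
import Mathlib
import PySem

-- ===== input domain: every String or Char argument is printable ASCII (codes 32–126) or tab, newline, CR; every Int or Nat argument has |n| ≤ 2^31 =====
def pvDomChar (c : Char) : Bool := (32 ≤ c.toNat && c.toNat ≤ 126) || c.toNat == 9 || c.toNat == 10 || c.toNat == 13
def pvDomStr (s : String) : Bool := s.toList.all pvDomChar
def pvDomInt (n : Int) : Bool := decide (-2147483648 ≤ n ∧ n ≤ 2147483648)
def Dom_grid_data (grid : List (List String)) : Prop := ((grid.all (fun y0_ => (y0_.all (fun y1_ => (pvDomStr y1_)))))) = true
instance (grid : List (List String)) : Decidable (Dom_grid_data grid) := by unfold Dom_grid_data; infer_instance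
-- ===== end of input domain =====

-- B replaces A's single interleaved dict-updating pass by a one-shot flattening into (i,j,cell)
-- triples plus independent per-category filters / reversed last-match scans (objective: simpler).

-- ===== PORT A =====
-- A's dict `positions` has the five fixed keys N,C,P,CN,CC; it is represented exactly by a
-- 5-tuple of its values in that key order (lookups/updates at a literal key become field access).
def gdUpd (st : List (List Int) × List (List Int) × List Int × List Int × List Int)
    (i j : Int) (cell : String) :
    List (List Int) × List (List Int) × List Int × List Int × List Int :=
  if cell = "N" ∨ cell = "C" ∨ cell = "P" ∨ cell = "CN" ∨ cell = "CC" then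
    if cell = "CN" ∨ cell = "CC" ∨ cell = "P" then
      if cell = "P" then (st.1, st.2.1, [i, j], st.2.2.2.1, st.2.2.2.2)
      else if cell = "CN" then (st.1, st.2.1, st.2.2.1, [i, j], st.2.2.2.2)
      else (st.1, st.2.1, st.2.2.1, st.2.2.2.1, [i, j])
    else
      if cell = "N" then (st.1 ++ [[i, j]], st.2.1, st.2.2.1, st.2.2.2.1, st.2.2.2.2)
      else (st.1, st.2.1 ++ [[i, j]], st.2.2.1, st.2.2.2.1, st.2.2.2.2)
  else st

def grid_data (grid : List (List String)) :
    List (List Int) × List (List Int) × List Int × List Int × List Int :=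
  (PySem.List.enumerate grid).foldl (fun st ir =>
    (PySem.List.enumerate ir.2).foldl (fun st jc => gdUpd st ir.1 jc.1 jc.2) st)
    ([], [], [], [], [])

-- ===== PORT B =====
def gdCells (grid : List (List String)) : List (Int × Int × String) :=
  (PySem.List.enumerate grid).flatMap (fun ir =>
    (PySem.List.enumerate ir.2).map (fun jc => (ir.1, jc.1, jc.2)))

-- `last(key)`: scan the reversed triple list for the first cell equal to key, default []
def gdLast (cells : List (Int × Int × String)) (key : String) : List Int :=
  match cells.reverse.find? (fun t => t.2.2 == key) with
  | some t => [t.1, t.2.1]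
  | none => []

def grid_data_alt (grid : List (List String)) :
    List (List Int) × List (List Int) × List Int × List Int × List Int :=
  let cells := gdCells grid
  ((cells.filter (fun t => t.2.2 == "N")).map (fun t => [t.1, t.2.1]),
   (cells.filter (fun t => t.2.2 == "C")).map (fun t => [t.1, t.2.1]),
   gdLast cells "P", gdLast cells "CN", gdLast cells "CC")

-- ===== PRECONDITION & SPEC =====
def Spec_grid_data (grid : List (List String)) (out : List (List Int) × List (List Int) × List Int × List Int × List Int) : Prop := out = grid_data_alt grid
instance (grid : List (List String)) (out : List (List Int) × List (List Int) × List Int × List Int × List Int) : Decidable (Spec_grid_data grid out) := by unfold Spec_grid_data; infer_instance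

-- ===== CLAIM (what is proved, stated in full; the proofs are below) =====
def Claim_equal_grid_data : Prop := ∀ (grid : List (List String)), Dom_grid_data grid → Spec_grid_data grid (grid_data grid)

-- ===== LEMMAS AND PROOFS =====
def gdStep (st : List (List Int) × List (List Int) × List Int × List Int × List Int)
    (t : Int × Int × String) :
    List (List Int) × List (List Int) × List Int × List Int × List Int :=
  gdUpd st t.1 t.2.1 t.2.2

-- "last match with default": gdLast with an explicit default accumulator
def gdLastOr (d : List Int) (key : String) (cells : List (Int × Int × String)) : List Int :=
  match cells.reverse.find? (fun t => t.2.2 == key) with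
  | some t => [t.1, t.2.1]
  | none => d

theorem gdLastOr_cons (d : List Int) (key : String) (t : Int × Int × String)
    (ts : List (Int × Int × String)) :
    gdLastOr d key (t :: ts) = gdLastOr (if t.2.2 == key then [t.1, t.2.1] else d) key ts := by
  simp only [gdLastOr, List.reverse_cons, List.find?_append]
  cases h : ts.reverse.find? (fun t => t.2.2 == key) with
  | some u => simp
  | none => by_cases hk : t.2.2 == key <;> simp [List.find?, hk]

theorem gd_fold (cells : List (Int × Int × String)) :
    ∀ st, cells.foldl gdStep st =
      (st.1 ++ (cells.filter (fun t => t.2.2 == "N")).map (fun t => [t.1, t.2.1]),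
       st.2.1 ++ (cells.filter (fun t => t.2.2 == "C")).map (fun t => [t.1, t.2.1]),
       gdLastOr st.2.2.1 "P" cells,
       gdLastOr st.2.2.2.1 "CN" cells,
       gdLastOr st.2.2.2.2 "CC" cells) := by
  induction cells with
  | nil => intro st; simp [gdLastOr]
  | cons t ts ih =>
    intro st
    obtain ⟨i, j, c⟩ := t
    rw [List.foldl_cons, ih]
    by_cases hN : c = "N"
    · subst hN; simp [gdStep, gdUpd, gdLastOr_cons]
    · by_cases hC : c = "C"
      · subst hC; simp [gdStep, gdUpd, gdLastOr_cons]
      · by_cases hP : c = "P"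
        · subst hP; simp [gdStep, gdUpd, gdLastOr_cons]
        · by_cases hCN : c = "CN"
          · subst hCN; simp [gdStep, gdUpd, gdLastOr_cons]
          · by_cases hCC : c = "CC"
            · subst hCC; simp [gdStep, gdUpd, gdLastOr_cons]
            · simp [gdStep, gdUpd, gdLastOr_cons, hN, hC, hP, hCN, hCC]

theorem gd_flat (grid : List (List String)) :
    grid_data grid = (gdCells grid).foldl gdStep ([], [], [], [], []) := by
  simp [grid_data, gdCells, List.foldl_flatMap, List.foldl_map, gdStep]

-- ===== VERDICT (by name: the statement is the Claim_ definition above) =====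
theorem grid_data_spec : Claim_equal_grid_data := by
  intro grid _
  show grid_data grid = grid_data_alt grid
  rw [gd_flat, gd_fold]
  simp [grid_data_alt, gdLast, gdLastOr]
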